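-- pv_equiv track=rewrite | github.com/bchwast/AGH-ASD | Kolokwia 20_21/kp1_ex2.py | dfs
-- ===== SOURCE A (Python) =====
-- def dfs(G, ign):
--     n = len(G)
--
--     def dfs_visit(G, u, ign):
--         visited[u] = True
--
--         for v in range(n):
--             if v == ign:
--                 continue
--             if G[u][v] != 0 and not visited[v]:
--                 parent[v] = u
--                 dfs_visit(G, v, ign)
--
--     visited = [False] * n
--     parent = [None] * n
--     comps = 0
--     for u in range(n):
--         if u == ign:
--             continue
--         if not visited[u]:
--             comps += 1
--             dfs_visit(G, u, ign)
--
--     return comps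
-- ===== SOURCE B (Python) =====
-- def dfs(G, ign):
--     # Iterative DFS with an explicit stack (no recursion, no parent array).
--     n = len(G)
--     visited = [False] * n
--     comps = 0
--     for u in range(n):
--         if u == ign or visited[u]:
--             continue
--         comps += 1
--         visited[u] = True
--         stack = [u]
--         while stack:
--             x = stack.pop()
--             for v in range(n):
--                 if v != ign and G[x][v] != 0 and not visited[v]:
--                     visited[v] = True
--                     stack.append(v)
--     return comps
-- ===== Notes on version B (the rewrite author's own statement) =====
-- stated objective: alternative
-- what changed: Replaces the recursive dfs_visit (and its unused parent array) with an explicit-stack iterative DFS that marks vertices when pushing; the outer root loop and skip conditions are unchanged.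
-- outside the precondition, e.g. on dfs([[0, 0], [0]], 1): A returns 1, B returns 1
import Mathlib
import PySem

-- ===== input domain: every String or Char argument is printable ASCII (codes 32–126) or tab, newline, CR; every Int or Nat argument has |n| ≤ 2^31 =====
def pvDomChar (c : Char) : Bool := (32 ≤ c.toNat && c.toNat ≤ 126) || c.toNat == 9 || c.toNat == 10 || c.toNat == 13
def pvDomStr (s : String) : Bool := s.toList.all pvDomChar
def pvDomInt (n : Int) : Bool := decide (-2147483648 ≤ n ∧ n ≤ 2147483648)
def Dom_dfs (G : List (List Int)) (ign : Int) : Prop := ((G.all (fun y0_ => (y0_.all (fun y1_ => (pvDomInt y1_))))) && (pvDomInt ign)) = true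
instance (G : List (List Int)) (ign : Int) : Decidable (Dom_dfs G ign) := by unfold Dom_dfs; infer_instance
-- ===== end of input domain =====

-- B replaces A's recursive dfs_visit (with its unused parent array) by an explicit-stack
-- iterative DFS marking vertices on push; same outer root loop, same returned count (alternative, not faster).

-- ===== PORT A =====
-- G[u][v] ported as total getD access; Pre_dfs excludes the inputs where Python would raise IndexError.
def rowGet (G : List (List Int)) (x v : ℕ) : Int := (G.getD x []).getD v 0

mutual
-- dfs_visit: marks u then scans v in range(n); fuel bounds the recursion depth (n suffices,
-- since every recursive call is on a freshly marked vertex).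
def visitA (G : List (List Int)) (ign : Int) (n : ℕ) :
    ℕ → List Bool → List (Option Int) → ℕ → List Bool × List (Option Int)
  | 0, vis, par, _ => (vis, par)
  | f + 1, vis, par, u => goA G ign n f u (List.range n) (vis.set u true) par
termination_by f vis par u => (f, 0)
decreasing_by all_goals simp_wf <;> omega

-- the `for v in range(n)` loop of dfs_visit
def goA (G : List (List Int)) (ign : Int) (n : ℕ) :
    ℕ → ℕ → List ℕ → List Bool → List (Option Int) → List Bool × List (Option Int)
  | _, _, [], vis, par => (vis, par)
  | f, u, v :: vs, vis, par =>
    if (v : Int) = ign then goA G ign n f u vs vis par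
    else if rowGet G u v ≠ 0 ∧ vis.getD v false = false then
      let st := visitA G ign n f vis (par.set v (some (u : Int))) v
      goA G ign n f u vs st.1 st.2
    else goA G ign n f u vs vis par
termination_by f u vs vis par => (f, vs.length + 1)
decreasing_by all_goals simp_wf <;> omega
end

def dfs (G : List (List Int)) (ign : Int) : Int :=
  let n := G.length
  ((List.range n).foldl
    (fun (st : (List Bool × List (Option Int)) × Int) (u : ℕ) =>
      if (u : Int) = ign then st
      else if st.1.1.getD u false = false then
        (visitA G ign n n st.1.1 st.1.2 u, st.2 + 1)
      else st)
    ((List.replicate n false, List.replicate n (none : Option Int)), 0)).2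

-- ===== PORT B =====
-- body of B's inner `for v in range(n)`: mark-and-push each new neighbour
def pushB (G : List (List Int)) (ign : Int) (x : ℕ)
    (st : List Bool × List ℕ) (v : ℕ) : List Bool × List ℕ :=
  if (v : Int) ≠ ign ∧ rowGet G x v ≠ 0 ∧ st.1.getD v false = false then
    (st.1.set v true, v :: st.2)
  else st

-- B's `while stack:` loop (stack top at the head); fuel bounds the iteration count
-- (each iteration pops one element and every push marks a new vertex, so n+1 suffices).
def visitB (G : List (List Int)) (ign : Int) (n : ℕ) :
    ℕ → List Bool → List ℕ → List Bool
  | 0, vis, _ => vis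
  | _ + 1, vis, [] => vis
  | f + 1, vis, x :: rest =>
    let st := (List.range n).foldl (pushB G ign x) (vis, rest)
    visitB G ign n f st.1 st.2

def dfs_alt (G : List (List Int)) (ign : Int) : Int :=
  let n := G.length
  ((List.range n).foldl
    (fun (st : List Bool × Int) (u : ℕ) =>
      if (u : Int) = ign ∨ st.1.getD u false = true then st
      else (visitB G ign n (n + 1) (st.1.set u true) [u], st.2 + 1))
    (List.replicate n false, 0)).2

-- ===== PRECONDITION & SPEC =====
-- Pre_dfs excludes ragged matrices (some row shorter than len(G)), on which Python's
-- G[u][v] raises IndexError — except when every short row happens to be unreachable,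
-- where A still returns (see the cite in claim.json).
def Pre_dfs (G : List (List Int)) (ign : Int) : Prop := ∀ row ∈ G, G.length ≤ row.length
instance (G : List (List Int)) (ign : Int) : Decidable (Pre_dfs G ign) := by unfold Pre_dfs; infer_instance
def pvWitness_dfs : List (List Int) × Int := ([[0, 1], [0, 0]], -1)

def Spec_dfs (G : List (List Int)) (ign : Int) (out : Int) : Prop := out = dfs_alt G ign
instance (G : List (List Int)) (ign : Int) (out : Int) : Decidable (Spec_dfs G ign out) := by unfold Spec_dfs; infer_instance

-- ===== CLAIM (what is proved, stated in full; the proofs are below) =====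
def Claim_equal_dfs : Prop := ∀ (G : List (List Int)) (ign : Int), Dom_dfs G ign → Pre_dfs G ign → Spec_dfs G ign (dfs G ign)

-- ===== LEMMAS AND PROOFS =====

-- vertex w is marked in the visited list
def Mem (vis : List Bool) (w : ℕ) : Prop := vis.getD w false = true

-- the edge relation both traversals follow: target in range, not ignored, nonzero entry
def Stp (G : List (List Int)) (ign : Int) (n : ℕ) (x y : ℕ) : Prop :=
  y < n ∧ (y : Int) ≠ ign ∧ rowGet G x y ≠ 0

abbrev Reach (G : List (List Int)) (ign : Int) (n : ℕ) : ℕ → ℕ → Prop :=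
  Relation.ReflTransGen (Stp G ign n)

-- visited list closed under Stp, modulo a pending set P
def ClosedMod (G : List (List Int)) (ign : Int) (n : ℕ) (vis : List Bool) (P : ℕ → Prop) : Prop :=
  ∀ x y, Mem vis x → Stp G ign n x y → Mem vis y ∨ P y

lemma bool_eq_of_iff {a b : Bool} (h : a = true ↔ b = true) : a = b := by
  cases a <;> cases b <;> simp_all

lemma mem_set_self {l : List Bool} {u : ℕ} (h : u < l.length) : Mem (l.set u true) u := by
  simp [Mem, List.getD_eq_getElem?_getD, List.getElem?_set_self, h]

lemma mem_set_mono {l : List Bool} {u w : ℕ} (h : Mem l w) : Mem (l.set u true) w := by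
  by_cases huw : u = w
  · subst huw
    by_cases hu : u < l.length
    · exact mem_set_self hu
    · simpa [Mem, List.set_eq_of_length_le (le_of_not_gt hu)] using h
  · simpa [Mem, List.getD_eq_getElem?_getD, List.getElem?_set_ne huw] using h

lemma mem_set_elim {l : List Bool} {u w : ℕ} (h : Mem (l.set u true) w) : Mem l w ∨ w = u := by
  by_cases huw : u = w
  · exact Or.inr huw.symm
  · left; simpa [Mem, List.getD_eq_getElem?_getD, List.getElem?_set_ne huw] using h

lemma count_set_true : ∀ (l : List Bool) (u : ℕ), u < l.length → l.getD u false = false →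
    (l.set u true).count false + 1 = l.count false := by
  intro l
  induction l with
  | nil => intro u hu _; simp at hu
  | cons a t ih =>
    intro u hu hm
    cases u with
    | zero =>
      simp [List.getD_cons_zero] at hm
      subst hm
      simp [List.count_cons]
    | succ u =>
      simp only [List.getD_cons_succ] at hm
      have := ih u (by simpa using hu) hm
      simp only [List.set_cons_succ, List.count_cons]
      omega

lemma count_mono_le : ∀ (l l' : List Bool), l.length = l'.length →
    (∀ w, Mem l w → Mem l' w) → l'.count false ≤ l.count false := by
  intro l
  induction l with
  | nil => intro l' hl _; cases l' <;> simp_all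
  | cons a t ih =>
    intro l' hl hm
    cases l' with
    | nil => simp at hl
    | cons b t' =>
      have hhead : a = true → b = true := by
        intro ha; simpa [Mem, List.getD_cons_zero] using hm 0 (by simp [Mem, List.getD_cons_zero, ha])
      have htail := ih t' (by simpa using hl) (fun w hw => by
        simpa [Mem, List.getD_cons_succ] using hm (w + 1) (by simpa [Mem, List.getD_cons_succ] using hw))
      cases a <;> cases b <;> simp_all [List.count_cons] <;> omega

lemma one_le_count {l : List Bool} {u : ℕ} (hu : u < l.length) (hm : l.getD u false = false) :
    1 ≤ l.count false := by
  have hget : l[u] = false := by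
    simpa [List.getD_eq_getElem?_getD, List.getElem?_eq_getElem hu] using hm
  have : false ∈ l := hget ▸ List.getElem_mem hu
  exact List.count_pos_iff.2 this

lemma ext_getD : ∀ (l l' : List Bool), l.length = l'.length →
    (∀ w, l.getD w false = l'.getD w false) → l = l' := by
  intro l
  induction l with
  | nil => intro l' hl _; cases l' <;> simp_all
  | cons a t ih =>
    intro l' hl h
    cases l' with
    | nil => simp at hl
    | cons b t' =>
      have h0 : a = b := by simpa [List.getD_cons_zero] using h 0
      have ht : t = t' := ih t' (by simpa using hl) (fun w => by simpa [List.getD_cons_succ] using h (w + 1))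
      rw [h0, ht]

lemma closedMod_weaken {G : List (List Int)} {ign : Int} {n : ℕ} {vis : List Bool}
    {P Q : ℕ → Prop} (h : ClosedMod G ign n vis P) (hpq : ∀ y, P y → Q y) :
    ClosedMod G ign n vis Q := by
  intro x y hx hst
  rcases h x y hx hst with hm | hp
  · exact Or.inl hm
  · exact Or.inr (hpq y hp)

-- the bundle of facts proved about A's dfs_visit at a given fuel
def AProps (G : List (List Int)) (ign : Int) (n f : ℕ) : Prop :=
  ∀ (vis : List Bool) (par : List (Option Int)) (u : ℕ),
    vis.length = n → u < n → (u : Int) ≠ ign → vis.getD u false = false →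
    vis.count false ≤ f →
    (visitA G ign n f vis par u).1.length = n ∧
    (∀ w, Mem vis w → Mem (visitA G ign n f vis par u).1 w) ∧
    Mem (visitA G ign n f vis par u).1 u ∧
    (∀ w, Mem (visitA G ign n f vis par u).1 w → Mem vis w ∨ Reach G ign n u w) ∧
    (∀ P : ℕ → Prop, ClosedMod G ign n vis P → ClosedMod G ign n (visitA G ign n f vis par u).1 P)

lemma goA_inv (G : List (List Int)) (ign : Int) (n f : ℕ) (hA : AProps G ign n f) (u : ℕ) :
    ∀ (vs : List ℕ) (vis : List Bool) (par : List (Option Int)),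
    (∀ v ∈ vs, v < n) → vis.length = n → vis.count false ≤ f →
    (goA G ign n f u vs vis par).1.length = n ∧
    (∀ w, Mem vis w → Mem (goA G ign n f u vs vis par).1 w) ∧
    (∀ w, Mem (goA G ign n f u vs vis par).1 w →
       Mem vis w ∨ ∃ v ∈ vs, Stp G ign n u v ∧ Reach G ign n v w) ∧
    (∀ P : ℕ → Prop,
       ClosedMod G ign n vis (fun y => P y ∨ (Stp G ign n u y ∧ y ∈ vs)) →
       ClosedMod G ign n (goA G ign n f u vs vis par).1 P) := by
  intro vs
  induction vs with
  | nil =>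
    intro vis par _ hlen hcnt
    simp only [goA]
    refine ⟨hlen, fun w hw => hw, fun w hw => Or.inl hw, ?_⟩
    intro P hcl
    refine closedMod_weaken hcl ?_
    rintro y (hp | ⟨_, hy⟩)
    · exact hp
    · simp at hy
  | cons v vs ih =>
    intro vis par hvs hlen hcnt
    have hv : v < n := hvs v (by simp)
    have htl : ∀ a ∈ vs, a < n := fun a ha => hvs a (by simp [ha])
    by_cases hig : (v : Int) = ign
    · simp only [goA, if_pos hig]
      obtain ⟨l1, l2, l3, l4⟩ := ih vis par htl hlen hcnt
      refine ⟨l1, l2, ?_, ?_⟩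
      · intro w hw
        exact (l3 w hw).imp id (fun ⟨v', hv', hs⟩ => ⟨v', by simp [hv'], hs⟩)
      · intro P hcl
        apply l4 P
        intro x y hx hst
        rcases hcl x y hx hst with hm | hp | ⟨hs, hmem⟩
        · exact Or.inl hm
        · exact Or.inr (Or.inl hp)
        · rcases List.mem_cons.1 hmem with heq | h
          · exact absurd (heq ▸ hig) hs.2.1
          · exact Or.inr (Or.inr ⟨hs, h⟩)
    · by_cases hc : rowGet G u v ≠ 0 ∧ vis.getD v false = false
      · simp only [goA, if_neg hig, if_pos hc]
        obtain ⟨a1, a2, a3, a4, a5⟩ :=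
          hA vis (par.set v (some (u : Int))) v hlen hv hig hc.2 hcnt
        obtain ⟨l1, l2, l3, l4⟩ :=
          ih (visitA G ign n f vis (par.set v (some (u : Int))) v).1
             (visitA G ign n f vis (par.set v (some (u : Int))) v).2 htl a1
             (le_trans (count_mono_le vis _ (hlen.trans a1.symm) a2) hcnt)
        have hstp : Stp G ign n u v := ⟨hv, hig, hc.1⟩
        refine ⟨l1, fun w hw => l2 w (a2 w hw), ?_, ?_⟩
        · intro w hw
          rcases l3 w hw with hm | ⟨v', hv', hs, hr⟩
          · rcases a4 w hm with hm' | hr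
            · exact Or.inl hm'
            · exact Or.inr ⟨v, by simp, hstp, hr⟩
          · exact Or.inr ⟨v', by simp [hv'], hs, hr⟩
        · intro P hcl
          apply l4 P
          have step1 : ClosedMod G ign n vis
              (fun y => (P y ∨ (Stp G ign n u y ∧ y ∈ vs)) ∨ y = v) := by
            apply closedMod_weaken hcl
            rintro y (hp | ⟨hs, hmem⟩)
            · exact Or.inl (Or.inl hp)
            · rcases List.mem_cons.1 hmem with rfl | h
              · exact Or.inr rfl
              · exact Or.inl (Or.inr ⟨hs, h⟩)
          have step2 := a5 _ step1
          intro x y hx hst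
          rcases step2 x y hx hst with hm | hp | rfl
          · exact Or.inl hm
          · exact Or.inr hp
          · exact Or.inl a3
      · simp only [goA, if_neg hig, if_neg hc]
        obtain ⟨l1, l2, l3, l4⟩ := ih vis par htl hlen hcnt
        refine ⟨l1, l2, ?_, ?_⟩
        · intro w hw
          exact (l3 w hw).imp id (fun ⟨v', hv', hs⟩ => ⟨v', by simp [hv'], hs⟩)
        · intro P hcl
          apply l4 P
          intro x y hx hst
          rcases hcl x y hx hst with hm | hp | ⟨hs, hmem⟩
          · exact Or.inl hm
          · exact Or.inr (Or.inl hp)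
          · rcases List.mem_cons.1 hmem with heq | h
            · subst heq
              have hb : ¬ vis.getD y false = false := fun hb => hc ⟨hs.2.2, hb⟩
              exact Or.inl (by simpa [Mem] using hb)
            · exact Or.inr (Or.inr ⟨hs, h⟩)

lemma visitA_main (G : List (List Int)) (ign : Int) (n : ℕ) : ∀ f, AProps G ign n f := by
  intro f
  induction f with
  | zero =>
    intro vis par u hlen hu hui hun hcnt
    have := one_le_count (hlen ▸ hu) hun
    omega
  | succ f ih =>
    intro vis par u hlen hu hui hun hcnt
    have hlen' : (vis.set u true).length = n := by simp [hlen]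
    have hcnt' : (vis.set u true).count false ≤ f := by
      have := count_set_true vis u (hlen ▸ hu) hun
      omega
    obtain ⟨l1, l2, l3, l4⟩ := goA_inv G ign n f ih u (List.range n) (vis.set u true) par
      (fun v hv => List.mem_range.1 hv) hlen' hcnt'
    simp only [visitA]
    refine ⟨l1, fun w hw => l2 w (mem_set_mono hw), l2 u (mem_set_self (hlen ▸ hu)), ?_, ?_⟩
    · intro w hw
      rcases l3 w hw with hm | ⟨v, _, hs, hr⟩
      · rcases mem_set_elim hm with hm' | heq
        · exact Or.inl hm'
        · exact Or.inr (heq ▸ Relation.ReflTransGen.refl)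
      · exact Or.inr (Relation.ReflTransGen.head hs hr)
    · intro P hcl
      apply l4 P
      intro x y hx hst
      rcases mem_set_elim hx with hx' | heq
      · rcases hcl x y hx' hst with hm | hp
        · exact Or.inl (mem_set_mono hm)
        · exact Or.inr (Or.inl hp)
      · exact Or.inr (Or.inr ⟨heq ▸ hst, List.mem_range.2 hst.1⟩)

lemma foldPush_inv (G : List (List Int)) (ign : Int) (n : ℕ) (x : ℕ) :
    ∀ (vs : List ℕ) (vis : List Bool) (stk : List ℕ),
    (∀ v ∈ vs, v < n) → vis.length = n →
    (vs.foldl (pushB G ign x) (vis, stk)).1.length = n ∧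
    (∀ w, Mem vis w → Mem (vs.foldl (pushB G ign x) (vis, stk)).1 w) ∧
    (∀ w, Mem (vs.foldl (pushB G ign x) (vis, stk)).1 w → Mem vis w ∨ Stp G ign n x w) ∧
    ((vs.foldl (pushB G ign x) (vis, stk)).1.count false +
       (vs.foldl (pushB G ign x) (vis, stk)).2.length ≤ vis.count false + stk.length) ∧
    (∀ s ∈ (vs.foldl (pushB G ign x) (vis, stk)).2, s ∈ stk ∨ Stp G ign n x s) ∧
    (∀ P : ℕ → Prop,
       ClosedMod G ign n vis
         (fun y => P y ∨ (∃ s ∈ stk, Stp G ign n s y) ∨ (Stp G ign n x y ∧ y ∈ vs)) →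
       ClosedMod G ign n (vs.foldl (pushB G ign x) (vis, stk)).1
         (fun y => P y ∨ ∃ s ∈ (vs.foldl (pushB G ign x) (vis, stk)).2, Stp G ign n s y)) := by
  intro vs
  induction vs with
  | nil =>
    intro vis stk _ hlen
    simp only [List.foldl_nil]
    refine ⟨hlen, fun w hw => hw, fun w hw => Or.inl hw, le_refl _, fun s hs => Or.inl hs, ?_⟩
    intro P hcl
    apply closedMod_weaken hcl
    rintro y (hp | hstk | ⟨_, hy⟩)
    · exact Or.inl hp
    · exact Or.inr hstk
    · simp at hy
  | cons v vs ih =>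
    intro vis stk hvs hlen
    have hv : v < n := hvs v (by simp)
    have htl : ∀ a ∈ vs, a < n := fun a ha => hvs a (by simp [ha])
    rw [List.foldl_cons]
    by_cases hc : (v : Int) ≠ ign ∧ rowGet G x v ≠ 0 ∧ vis.getD v false = false
    · rw [show pushB G ign x (vis, stk) v = (vis.set v true, v :: stk) from by
        simp only [pushB]; rw [if_pos hc]]
      obtain ⟨l1, l2, l3, l4, l5, l6⟩ := ih (vis.set v true) (v :: stk) htl (by simp [hlen])
      have hstp : Stp G ign n x v := ⟨hv, hc.1, hc.2.1⟩
      have hcv := count_set_true vis v (hlen ▸ hv) hc.2.2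
      refine ⟨l1, fun w hw => l2 w (mem_set_mono hw), ?_, ?_, ?_, ?_⟩
      · intro w hw
        rcases l3 w hw with hm | hs
        · rcases mem_set_elim hm with h | rfl
          · exact Or.inl h
          · exact Or.inr hstp
        · exact Or.inr hs
      · simp only [List.length_cons] at l4 ⊢
        omega
      · intro s hs
        rcases l5 s hs with h | h
        · rcases List.mem_cons.1 h with rfl | h'
          · exact Or.inr hstp
          · exact Or.inl h'
        · exact Or.inr h
      · intro P hcl
        apply l6 P
        intro x' y hx' hst
        rcases mem_set_elim hx' with hm | heq
        · rcases hcl x' y hm hst with h | hp | hstk | ⟨hs, hmem⟩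
          · exact Or.inl (mem_set_mono h)
          · exact Or.inr (Or.inl hp)
          · obtain ⟨s, hsmem, hss⟩ := hstk
            exact Or.inr (Or.inr (Or.inl ⟨s, by simp [hsmem], hss⟩))
          · rcases List.mem_cons.1 hmem with heq | h
            · subst heq
              exact Or.inl (mem_set_self (hlen ▸ hv))
            · exact Or.inr (Or.inr (Or.inr ⟨hs, h⟩))
        · subst heq
          exact Or.inr (Or.inr (Or.inl ⟨x', by simp, hst⟩))
    · rw [show pushB G ign x (vis, stk) v = (vis, stk) from by
        simp only [pushB]; rw [if_neg hc]]
      obtain ⟨l1, l2, l3, l4, l5, l6⟩ := ih vis stk htl hlen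
      refine ⟨l1, l2, l3, l4, l5, ?_⟩
      intro P hcl
      apply l6 P
      intro x' y hx' hst
      rcases hcl x' y hx' hst with hm | hp | hstk | ⟨hs, hmem⟩
      · exact Or.inl hm
      · exact Or.inr (Or.inl hp)
      · exact Or.inr (Or.inr (Or.inl hstk))
      · rcases List.mem_cons.1 hmem with heq | h
        · subst heq
          have hb : ¬ vis.getD y false = false := fun hb => hc ⟨hs.2.1, hs.2.2, hb⟩
          exact Or.inl (by simpa [Mem] using hb)
        · exact Or.inr (Or.inr (Or.inr ⟨hs, h⟩))

lemma visitB_main (G : List (List Int)) (ign : Int) (n : ℕ) :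
    ∀ (f : ℕ) (vis : List Bool) (stk : List ℕ),
    vis.length = n → vis.count false + stk.length ≤ f →
    (visitB G ign n f vis stk).length = n ∧
    (∀ w, Mem vis w → Mem (visitB G ign n f vis stk) w) ∧
    (∀ w, Mem (visitB G ign n f vis stk) w → Mem vis w ∨ ∃ s ∈ stk, Reach G ign n s w) ∧
    (∀ P : ℕ → Prop,
       ClosedMod G ign n vis (fun y => P y ∨ ∃ s ∈ stk, Stp G ign n s y) →
       ClosedMod G ign n (visitB G ign n f vis stk) P) := by
  intro f
  induction f with
  | zero =>
    intro vis stk hlen hcnt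
    have hstk : stk = [] := List.length_eq_zero_iff.1 (by omega)
    subst hstk
    simp only [visitB]
    refine ⟨hlen, fun w hw => hw, fun w hw => Or.inl hw, ?_⟩
    intro P hcl
    apply closedMod_weaken hcl
    rintro y (hp | ⟨s, hs, _⟩)
    · exact hp
    · simp at hs
  | succ f ih =>
    intro vis stk hlen hcnt
    cases stk with
    | nil =>
      simp only [visitB]
      refine ⟨hlen, fun w hw => hw, fun w hw => Or.inl hw, ?_⟩
      intro P hcl
      apply closedMod_weaken hcl
      rintro y (hp | ⟨s, hs, _⟩)
      · exact hp
      · simp at hs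
    | cons x rest =>
      simp only [visitB]
      obtain ⟨c1, c2, c3, c4, c5, c6⟩ :=
        foldPush_inv G ign n x (List.range n) vis rest (fun v hv => List.mem_range.1 hv) hlen
      have hcnt' : (∀ m, m = (List.range n).foldl (pushB G ign x) (vis, rest) →
          m.1.count false + m.2.length ≤ f) := by
        intro m hm
        subst hm
        simp only [List.length_cons] at hcnt
        omega
      obtain ⟨b1, b2, b3, b4⟩ := ih _ _ c1 (hcnt' _ rfl)
      refine ⟨b1, fun w hw => b2 w (c2 w hw), ?_, ?_⟩
      · intro w hw
        rcases b3 w hw with hm | ⟨s, hs, hreach⟩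
        · rcases c3 w hm with h | h
          · exact Or.inl h
          · exact Or.inr ⟨x, by simp, Relation.ReflTransGen.single h⟩
        · rcases c5 s hs with h | h
          · exact Or.inr ⟨s, by simp [h], hreach⟩
          · exact Or.inr ⟨x, by simp, Relation.ReflTransGen.head h hreach⟩
      · intro P hcl
        apply b4 P
        apply c6 P
        intro x' y hx' hst
        rcases hcl x' y hx' hst with hm | hp | ⟨s, hs, hstp⟩
        · exact Or.inl hm
        · exact Or.inr (Or.inl hp)
        · rcases List.mem_cons.1 hs with heq | h
          · subst heq
            exact Or.inr (Or.inr (Or.inr ⟨hstp, List.mem_range.2 hstp.1⟩))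
          · exact Or.inr (Or.inr (Or.inl ⟨s, h, hstp⟩))

lemma root_eq (G : List (List Int)) (ign : Int) (n : ℕ) (vis : List Bool)
    (par : List (Option Int)) (u : ℕ) (hlen : vis.length = n) (hu : u < n)
    (hui : (u : Int) ≠ ign) (hun : vis.getD u false = false)
    (hcl : ClosedMod G ign n vis (fun _ => False)) :
    (visitA G ign n n vis par u).1 = visitB G ign n (n + 1) (vis.set u true) [u] ∧
    (visitA G ign n n vis par u).1.length = n ∧
    ClosedMod G ign n (visitA G ign n n vis par u).1 (fun _ => False) := by
  obtain ⟨a1, a2, a3, a4, a5⟩ := visitA_main G ign n n vis par u hlen hu hui hun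
    (hlen ▸ List.count_le_length)
  have hclA := a5 _ hcl
  have reachA : ∀ w, Reach G ign n u w → Mem (visitA G ign n n vis par u).1 w := by
    intro w hr
    induction hr with
    | refl => exact a3
    | tail hab hbc ihr =>
      rcases hclA _ _ ihr hbc with h | h
      · exact h
      · exact h.elim
  obtain ⟨b1, b2, b3, b4⟩ := visitB_main G ign n (n + 1) (vis.set u true) [u]
    (by simp [hlen])
    (by
      have h1 : (vis.set u true).count false ≤ n := by
        have := List.count_le_length (a := false) (l := vis.set u true)
        simpa [hlen] using this
      simp only [List.length_cons, List.length_nil]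
      omega)
  have hclB0 : ClosedMod G ign n (vis.set u true)
      (fun y => False ∨ ∃ s ∈ [u], Stp G ign n s y) := by
    intro x y hx hst
    rcases mem_set_elim hx with hm | heq
    · rcases hcl x y hm hst with h | h
      · exact Or.inl (mem_set_mono h)
      · exact h.elim
    · exact Or.inr (Or.inr ⟨u, by simp, heq ▸ hst⟩)
  have hclB := b4 _ hclB0
  have reachB : ∀ w, Reach G ign n u w → Mem (visitB G ign n (n + 1) (vis.set u true) [u]) w := by
    intro w hr
    induction hr with
    | refl => exact b2 u (mem_set_self (hlen ▸ hu))
    | tail hab hbc ihr =>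
      rcases hclB _ _ ihr hbc with h | h
      · exact h
      · exact h.elim
  have heq : (visitA G ign n n vis par u).1 = visitB G ign n (n + 1) (vis.set u true) [u] := by
    apply ext_getD _ _ (a1.trans b1.symm)
    intro w
    apply bool_eq_of_iff
    constructor
    · intro hw
      rcases a4 w hw with hm | hr
      · exact b2 w (mem_set_mono hm)
      · exact reachB w hr
    · intro hw
      rcases b3 w hw with hm | ⟨s, hs, hr⟩
      · rcases mem_set_elim hm with h | heq
        · exact a2 w h
        · exact heq ▸ a3
      · have hs' : s = u := by simpa using hs
        subst hs'
        exact reachA w hr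
  exact ⟨heq, a1, hclA⟩

lemma outer_inv (G : List (List Int)) (ign : Int) (n : ℕ) :
    ∀ (l : List ℕ) (vis : List Bool) (par : List (Option Int)) (c : Int),
    (∀ u ∈ l, u < n) → vis.length = n → ClosedMod G ign n vis (fun _ => False) →
    (l.foldl
      (fun (st : (List Bool × List (Option Int)) × Int) (u : ℕ) =>
        if (u : Int) = ign then st
        else if st.1.1.getD u false = false then
          (visitA G ign n n st.1.1 st.1.2 u, st.2 + 1)
        else st) ((vis, par), c)).2 =
    (l.foldl
      (fun (st : List Bool × Int) (u : ℕ) =>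
        if (u : Int) = ign ∨ st.1.getD u false = true then st
        else (visitB G ign n (n + 1) (st.1.set u true) [u], st.2 + 1)) (vis, c)).2 := by
  intro l
  induction l with
  | nil => intro vis par c _ _ _; simp
  | cons u l ih =>
    intro vis par c hl hlen hcl
    have hu : u < n := hl u (by simp)
    have htl : ∀ a ∈ l, a < n := fun a ha => hl a (by simp [ha])
    simp only [List.foldl_cons]
    by_cases hig : (u : Int) = ign
    · rw [if_pos hig, if_pos (Or.inl hig)]
      exact ih vis par c htl hlen hcl
    · rw [if_neg hig]
      by_cases hvis : vis.getD u false = true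
      · rw [if_neg (show ¬(vis.getD u false = false) from fun h => by
            rw [h] at hvis; cases hvis),
          if_pos (Or.inr hvis)]
        exact ih vis par c htl hlen hcl
      · have hun : vis.getD u false = false := by simpa using hvis
        rw [if_pos hun,
          if_neg (show ¬((u : Int) = ign ∨ vis.getD u false = true) from by
            rintro (h | h)
            · exact hig h
            · exact hvis h)]
        obtain ⟨heq, hlen', hcl'⟩ := root_eq G ign n vis par u hlen hu hig hun hcl
        rw [← heq]
        exact ih (visitA G ign n n vis par u).1 (visitA G ign n n vis par u).2 (c + 1)
          htl hlen' hcl' 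

theorem dfs_main (G : List (List Int)) (ign : Int) : dfs G ign = dfs_alt G ign := by
  have hcl : ClosedMod G ign G.length (List.replicate G.length false) (fun _ => False) := by
    intro x y hx _
    exfalso
    simp only [Mem, List.getD_eq_getElem?_getD, List.getElem?_replicate] at hx
    split at hx <;> simp_all
  simp only [dfs, dfs_alt]
  exact outer_inv G ign G.length (List.range G.length)
    (List.replicate G.length false) (List.replicate G.length none) 0
    (fun u hu => List.mem_range.1 hu) (by simp) hcl

-- ===== VERDICT (by name: the statement is the Claim_ definition above) =====
theorem dfs_spec : Claim_equal_dfs := by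
  intro G ign _ _
  unfold Spec_dfs
  exact dfs_main G ign
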